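-- pv_equiv track=rewrite | github.com/shekharupadhyay/cs580-query-project | code/problem3_naive_join.py | naive_line_join
-- ===== SOURCE A (Python) =====
-- from collections import defaultdict
-- from typing import List, Tuple
--
-- def hash_join_generic(
--     left: List[Tuple[int, ...]],
--     right: List[Tuple[int, ...]],
--     left_key_index: int,
--     right_key_index: int,
-- ) -> List[Tuple[int, ...]]:
--
--
--     hash_right = defaultdict(list)
--     for t in right:
--         key = t[right_key_index]
--         hash_right[key].append(t)
--
--     result: List[Tuple[int, ...]] = []
--
--     for lt in left:
--         key = lt[left_key_index]
--         if key in hash_right: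
--             for rt in hash_right[key]:
--                 merged = lt + rt[:right_key_index] + rt[right_key_index + 1 :]
--                 result.append(merged)
--
--     return result
--
-- def naive_line_join(relations: List[List[Tuple[int, int]]]) -> List[Tuple[int, ...]]:
--
--     if not relations:
--         return []
--
--     current = relations[0]
--
--
--     if len(relations) == 1:
--         return [tuple(t) for t in current]
--
--
--     for i in range(1, len(relations)):
--         next_rel = relations[i]
--
--         current = hash_join_generic(
--             current,
--             next_rel,
--             left_key_index=len(current[0]) - 1,
--             right_key_index=0,
--         )
--
--
--         if not current:
--             break
--
--     return current
-- ===== SOURCE B (Python) =====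
-- from collections import defaultdict
--
-- def naive_line_join(relations):
--     # Index-then-DFS chain join: build one value-index per later relation,
--     # then depth-first extend each row of the first relation.
--     if not relations:
--         return []
--     if len(relations) == 1:
--         return [tuple(t) for t in relations[0]]
--     indexes = []
--     for rel in relations[1:]:
--         idx = defaultdict(list)
--         for k, v in rel:
--             idx[k].append(v)
--         indexes.append(idx)
--
--     def dfs(prefix, last, i):
--         if i == len(indexes):
--             return [prefix]
--         out = []
--         for v in indexes[i].get(last, []):
--             out.extend(dfs(prefix + (v,), v, i + 1))
--         return out
--
--     result = []
--     for a, b in relations[0]: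
--         result.extend(dfs((a, b), b, 0))
--     return result
-- ===== Notes on version B (the rewrite author's own statement) =====
-- stated objective: alternative
-- what changed: Replaces A's left-to-right pairwise fold of hash joins (which materialises every intermediate joined relation) by building one key->values index per later relation once and emitting the result rows directly by a depth-first recursive extension of each first-relation row, which yields the same rows in the same order.
-- crash fix: When the first relation is empty and there are at least two relations, A raises IndexError on current[0]; B returns an empty result list. — e.g. on naive_line_join([[], [(1, 2)]]): A raises IndexError, B returns []
import Mathlib
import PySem

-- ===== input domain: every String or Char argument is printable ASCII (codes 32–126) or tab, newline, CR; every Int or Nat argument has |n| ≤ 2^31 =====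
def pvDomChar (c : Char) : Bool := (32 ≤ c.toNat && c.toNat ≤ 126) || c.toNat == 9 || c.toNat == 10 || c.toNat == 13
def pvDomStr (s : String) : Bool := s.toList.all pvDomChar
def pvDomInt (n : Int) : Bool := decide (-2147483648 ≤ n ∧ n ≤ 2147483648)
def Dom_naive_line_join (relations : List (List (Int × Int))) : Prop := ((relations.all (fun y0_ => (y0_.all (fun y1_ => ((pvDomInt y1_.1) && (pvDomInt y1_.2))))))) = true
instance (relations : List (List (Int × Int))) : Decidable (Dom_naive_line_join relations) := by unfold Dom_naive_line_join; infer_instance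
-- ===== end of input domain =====

-- B replaces A's pairwise fold of hash joins by per-relation indexes plus a DFS that
-- emits the joined rows directly (same rows, same order); alternative decomposition.

-- ===== PORT A =====
-- hash_join_generic's defaultdict build loop ('hash_right[key].append(t)' = modify key [] (· ++ [t]))
def hjBuild (right : List (List Int)) (rki : Int)
    (d : PySem.Dict Int (List (List Int))) : Option (PySem.Dict Int (List (List Int))) :=
  match right with
  | [] => some d
  | t :: ts =>
      match PySem.List.pyGet? t rki with
      | none => none                                   -- IndexError t[rki]
      | some key => hjBuild ts rki (d.modify key [] (· ++ [t]))

-- hash_join_generic's probe loop ('if key in hash_right: for rt in hash_right[key]: …')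
def hjProbe (left : List (List Int)) (lki : Int) (hr : PySem.Dict Int (List (List Int)))
    (rki : Int) (acc : List (List Int)) : Option (List (List Int)) :=
  match left with
  | [] => some acc
  | lt :: ls =>
      match PySem.List.pyGet? lt lki with
      | none => none                                   -- IndexError lt[lki]
      | some key =>
          match hr.get? key with
          | none => hjProbe ls lki hr rki acc
          | some rows =>
              hjProbe ls lki hr rki
                (acc ++ rows.map (fun rt =>
                  lt ++ PySem.List.slice rt none (some rki)
                     ++ PySem.List.slice rt (some (rki + 1)) none))

def hash_join_generic (left right : List (List Int)) (lki rki : Int) :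
    Option (List (List Int)) :=
  match hjBuild right rki PySem.Dict.empty with
  | none => none
  | some hr => hjProbe left lki hr rki []

-- the 'for i in range(1, len(relations))' loop, with its early break on empty current
def joinLoop : List (List (Int × Int)) → List (List Int) → Option (List (List Int))
  | [], current => some current
  | next :: rest, current =>
      match PySem.List.pyGet? current 0 with
      | none => none                                   -- IndexError current[0]
      | some h =>
          match hash_join_generic current (next.map (fun t => [t.1, t.2]))
                  ((h.length : Int) - 1) 0 with
          | none => none
          | some cur' => if cur' = [] then some cur' else joinLoop rest cur'

def naive_line_join (relations : List (List (Int × Int))) : List (List Int) :=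
  match relations with
  | [] => []
  | r0 :: rest =>
      let current := r0.map (fun t => [t.1, t.2])
      if rest = [] then current                        -- len(relations) == 1
      else (joinLoop rest current).getD []             -- none only outside Pre_

-- ===== PORT B =====
-- per-relation index: defaultdict(list) with idx[k].append(v)
def nljIndex (rel : List (Int × Int)) : PySem.Dict Int (List Int) :=
  rel.foldl (fun d p => d.modify p.1 [] (· ++ [p.2])) PySem.Dict.empty

-- dfs(prefix, last, i): extend prefix through the remaining indexes
def nljDfs (idxs : List (PySem.Dict Int (List Int))) (pfx : List Int) (last : Int) :
    List (List Int) :=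
  match idxs with
  | [] => [pfx]
  | idx :: rest => (idx.getD last []).flatMap (fun v => nljDfs rest (pfx ++ [v]) v)

def naive_line_join_alt (relations : List (List (Int × Int))) : List (List Int) :=
  match relations with
  | [] => []
  | [r] => r.map (fun t => [t.1, t.2])
  | r0 :: rest =>
      let idxs := rest.map nljIndex
      r0.flatMap (fun p => nljDfs idxs [p.1, p.2] p.2)

-- ===== PRECONDITION & SPEC =====
-- Pre_ excludes exactly the inputs where A raises IndexError: an empty first relation
-- together with at least two relations (A then evaluates current[0] on an empty current).
def Pre_naive_line_join (relations : List (List (Int × Int))) : Prop :=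
  relations.length ≤ 1 ∨ relations.headD [] ≠ []
instance (relations : List (List (Int × Int))) : Decidable (Pre_naive_line_join relations) := by
  unfold Pre_naive_line_join; infer_instance

def pvWitness_naive_line_join : (List (List (Int × Int))) :=
  [[(1, 2), (3, 2)], [(2, 5), (2, 7)], [(5, 9)]]

-- When the first relation is empty and there are at least two relations, A raises
-- IndexError (current[0]); B returns an empty result list.
def Raises_naive_line_join (relations : List (List (Int × Int))) : Prop :=
  2 ≤ relations.length ∧ relations.headD [] = []
instance (relations : List (List (Int × Int))) : Decidable (Raises_naive_line_join relations) := by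
  unfold Raises_naive_line_join; infer_instance

def pvRaiseWitness_naive_line_join : (List (List (Int × Int))) := [[], [(1, 2)]]
def pvRaiseWitnessOut_naive_line_join : List (List Int) := []

def Spec_naive_line_join (relations : List (List (Int × Int))) (out : List (List Int)) : Prop :=
  out = naive_line_join_alt relations
instance (relations : List (List (Int × Int))) (out : List (List Int)) :
    Decidable (Spec_naive_line_join relations out) := by
  unfold Spec_naive_line_join; infer_instance

-- ===== CLAIM (what is proved, stated in full; the proofs are below) =====
def Claim_equal_naive_line_join : Prop :=
  ∀ (relations : List (List (Int × Int))), Dom_naive_line_join relations →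
    Pre_naive_line_join relations →
    Spec_naive_line_join relations (naive_line_join relations)

def Claim_raises_naive_line_join : Prop :=
  (∀ (relations : List (List (Int × Int))), Dom_naive_line_join relations →
      Raises_naive_line_join relations → ¬ Pre_naive_line_join relations) ∧
  (Dom_naive_line_join (pvRaiseWitness_naive_line_join) ∧
   Raises_naive_line_join (pvRaiseWitness_naive_line_join) ∧
   naive_line_join_alt (pvRaiseWitness_naive_line_join) = pvRaiseWitnessOut_naive_line_join)

-- ===== LEMMAS AND PROOFS =====

-- one join step of A, expressed on the pair-shaped source relation
def joinStep (next : List (Int × Int)) (current : List (List Int)) : List (List Int) :=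
  current.flatMap (fun lt =>
    (next.filter (fun p => p.1 == lt.getLastD 0)).map (fun p => lt ++ [p.2]))

-- the dict hjBuild builds from pair-shaped rows is the grouping fold over the pairs
lemma hjBuild_map (next : List (Int × Int)) (d : PySem.Dict Int (List (List Int))) :
    hjBuild (next.map (fun t => [t.1, t.2])) 0 d =
      some (next.foldl (fun d p => d.modify p.1 [] (· ++ [[p.1, p.2]])) d) := by
  induction next generalizing d with
  | nil => rfl
  | cons p ps ih => simp [hjBuild, PySem.List.pyGet?, PySem.List.pyIdx?, ih]

-- lookup in that grouping fold: the rows of l with key k, in order, after d's entry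
lemma getD_groupFold (l : List (Int × Int)) (d : PySem.Dict Int (List (List Int))) (k : Int) :
    (l.foldl (fun d p => d.modify p.1 [] (· ++ [[p.1, p.2]])) d).getD k [] =
      d.getD k [] ++ (l.filter (fun p => p.1 == k)).map (fun p => [p.1, p.2]) := by
  induction l generalizing d with
  | nil => simp
  | cons p ps ih =>
      simp only [List.foldl_cons, ih, List.filter_cons]
      by_cases h : p.1 = k
      · subst h; simp [PySem.Dict.getD_modify_self]
      · rw [PySem.Dict.getD_modify, if_neg (fun hk => h hk.symm)]
        simp [h]

-- the probe loop, when every left row answers key g lt, appends the joined rows per lt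
lemma hjProbe_eq (left : List (List Int)) (lki : Int)
    (hr : PySem.Dict Int (List (List Int))) (acc : List (List Int))
    (g : List Int → Int) (hg : ∀ lt ∈ left, PySem.List.pyGet? lt lki = some (g lt)) :
    hjProbe left lki hr 0 acc =
      some (acc ++ left.flatMap (fun lt =>
        (hr.getD (g lt) []).map (fun rt => lt ++ rt.drop 1))) := by
  induction left generalizing acc with
  | nil => simp [hjProbe]
  | cons lt ls ih =>
      have hlt := hg lt (by simp)
      have hls : ∀ x ∈ ls, PySem.List.pyGet? x lki = some (g x) :=
        fun x hx => hg x (List.mem_cons_of_mem _ hx)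
      rcases h : hr.get? (g lt) with _ | rows
      · simp only [hjProbe, hlt, h]
        rw [ih _ hls]
        simp [PySem.Dict.getD_eq_get?_getD, h]
      · simp only [hjProbe, hlt, h]
        rw [ih _ hls]
        have hrows : hr.getD (g lt) [] = rows := by
          simp [PySem.Dict.getD_eq_get?_getD, h]
        have hsl : ∀ rt : List Int,
            lt ++ PySem.List.slice rt none (some 0)
               ++ PySem.List.slice rt (some (0 + 1)) none = lt ++ rt.drop 1 := by
          intro rt; simp [pysem]
        simp only [List.flatMap_cons, hrows, hsl, List.append_assoc]

-- last element of a row of known positive length, as Python indexes it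
lemma pyGet_last (lt : List Int) (L : Nat) (hL : 1 ≤ L) (hlen : lt.length = L) :
    PySem.List.pyGet? lt ((L : Int) - 1) = some (lt.getLastD 0) := by
  have hne : lt ≠ [] := by intro h; subst h; simp at hlen; omega
  have h1 : ((L : Int) - 1) = ((L - 1 : Nat) : Int) := by omega
  subst hlen
  rw [h1, PySem.List.pyGet?_natCast, ← List.getLast?_eq_getElem?,
      List.getLastD_eq_getLast?, List.getLast?_eq_some_getLast hne]
  simp

-- A's hash join of current with a pair relation on (last column = first column) is joinStep
lemma hash_join_eq (next : List (Int × Int)) (current : List (List Int)) (L : Nat)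
    (hL : 1 ≤ L) (hlen : ∀ lt ∈ current, lt.length = L) :
    hash_join_generic current (next.map (fun t => [t.1, t.2])) ((L : Int) - 1) 0 =
      some (joinStep next current) := by
  simp only [hash_join_generic, hjBuild_map]
  rw [hjProbe_eq current _ _ [] (fun lt => lt.getLastD 0)
        (fun lt hlt => pyGet_last lt L hL (hlen lt hlt))]
  congr 1
  rw [List.nil_append, joinStep]
  apply List.flatMap_congr
  intro lt _
  rw [getD_groupFold]
  simp [List.map_map, Function.comp_def]

-- B's lookup in an index is the ordered filter of the relation
lemma nljIndex_getD (rel : List (Int × Int)) (k : Int) :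
    (nljIndex rel).getD k [] = (rel.filter (fun p => p.1 == k)).map (·.2) := by
  rw [nljIndex, PySem.Dict.getD_foldl_modify_append]
  simp

-- pushing one DFS level through joinStep
lemma dfs_step (next : List (Int × Int)) (current : List (List Int))
    (idxs : List (PySem.Dict Int (List Int))) :
    current.flatMap (fun lt => nljDfs (nljIndex next :: idxs) lt (lt.getLastD 0)) =
      (joinStep next current).flatMap (fun row => nljDfs idxs row (row.getLastD 0)) := by
  rw [joinStep, List.flatMap_assoc]
  apply List.flatMap_congr
  intro lt _
  rw [nljDfs, nljIndex_getD, List.flatMap_map, List.flatMap_map]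
  apply List.flatMap_congr
  intro p _
  simp

-- main loop invariant: A's pairwise fold equals B's DFS started from every current row
lemma loop_eq (rest : List (List (Int × Int))) (current : List (List Int)) (L : Nat)
    (hL : 1 ≤ L) (hlen : ∀ lt ∈ current, lt.length = L) (hne : current ≠ []) :
    joinLoop rest current =
      some (current.flatMap (fun lt => nljDfs (rest.map nljIndex) lt (lt.getLastD 0))) := by
  induction rest generalizing current L with
  | nil => simp [joinLoop, nljDfs]
  | cons next rs ih =>
      obtain ⟨c0, cs, rfl⟩ := List.exists_cons_of_ne_nil hne
      have hhead : PySem.List.pyGet? (c0 :: cs) (0 : Int) = some c0 := by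
        simp [PySem.List.pyGet?, PySem.List.pyIdx?]
      have hc0 : c0.length = L := hlen c0 (by simp)
      have hjoin := hash_join_eq next (c0 :: cs) L hL hlen
      simp only [joinLoop, hhead, hc0, hjoin, List.map_cons]
      rw [dfs_step]
      by_cases hcur : joinStep next (c0 :: cs) = []
      · rw [hcur]; simp
      · rw [if_neg hcur]
        exact ih (joinStep next (c0 :: cs)) (L + 1) (by omega)
          (by
            intro row hrow
            rw [joinStep] at hrow
            obtain ⟨lt, hlt, hrow⟩ := List.mem_flatMap.mp hrow
            obtain ⟨p, _, rfl⟩ := List.mem_map.mp hrow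
            simp [hlen lt hlt])
          hcur

-- ===== VERDICT (by name: the statement is the Claim_ definition above) =====
theorem naive_line_join_spec : Claim_equal_naive_line_join := by
  intro relations _ hpre
  unfold Spec_naive_line_join
  match relations with
  | [] => rfl
  | [r] => rfl
  | r0 :: next :: rest =>
      have hr0 : r0 ≠ [] := by
        rcases hpre with h | h
        · simp at h
        · simpa using h
      have hne : r0.map (fun t : Int × Int => [t.1, t.2]) ≠ [] := by
        simpa using hr0
      simp only [naive_line_join, if_neg (List.cons_ne_nil next rest)]
      rw [loop_eq (next :: rest) _ 2 (by omega)
            (by intro lt hlt; obtain ⟨p, _, rfl⟩ := List.mem_map.mp hlt; rfl) hne]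
      simp only [Option.getD_some, naive_line_join_alt, List.flatMap_map]
      rfl

@[simp]
theorem naive_line_join_raises : Claim_raises_naive_line_join := by
  unfold Claim_raises_naive_line_join
  refine ⟨?_, by decide, by decide, by decide⟩
  intro relations _ hr hpre
  rcases hr with ⟨h2, hh⟩
  rcases hpre with h | h
  · omega
  · exact h hh
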